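-- pv_equiv track=rewrite | github.com/ethanrouzier/OpticAIre01 | extract_fields_by_category.py | _strip_md_outside_strings
-- ===== SOURCE A (Python) =====
-- def _strip_md_outside_strings(s: str) -> str:
--     out = []
--     in_str = False
--     esc = False
--     for ch in s:
--         if in_str:
--             out.append(ch)
--             if ch == '"' and not esc:
--                 in_str = False
--             esc = (ch == "\\" and not esc)
--         else:
--             if ch == '"':
--                 in_str = True
--                 out.append(ch)
--                 esc = False
--             elif ch in ('*', '`'):
--                 continue
--             else:
--                 out.append(ch)
--     return ''.join(out)
-- ===== SOURCE B (Python) =====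
-- def _strip_md_outside_strings(s: str) -> str:
--     # Span-based: locate quoted-string spans first; copy them verbatim,
--     # and strip '*'/'`' from the gaps between them with str.replace.
--     out = []
--     n = len(s)
--     pos = 0
--     while pos < n:
--         q = s.find('"', pos)
--         if q == -1:
--             out.append(s[pos:].replace('*', '').replace('`', ''))
--             pos = n
--             break
--         out.append(s[pos:q].replace('*', '').replace('`', ''))
--         k = q + 1
--         while k < n:
--             c = s[k]
--             if c == '\\':
--                 k += 2
--             elif c == '"':
--                 k += 1
--                 break
--             else:
--                 k += 1
--         k = min(k, n)
--         out.append(s[q:k])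
--         pos = k
--     return ''.join(out)
-- ===== Notes on version B (the rewrite author's own statement) =====
-- stated objective: alternative
-- what changed: Replaces the per-character in_str/esc boolean state machine with a span scanner: find each quoted-string span (consuming backslash escapes two characters at a time), copy it verbatim, and strip '*'/'`' from the gaps between spans with str.replace.
import Mathlib
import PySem

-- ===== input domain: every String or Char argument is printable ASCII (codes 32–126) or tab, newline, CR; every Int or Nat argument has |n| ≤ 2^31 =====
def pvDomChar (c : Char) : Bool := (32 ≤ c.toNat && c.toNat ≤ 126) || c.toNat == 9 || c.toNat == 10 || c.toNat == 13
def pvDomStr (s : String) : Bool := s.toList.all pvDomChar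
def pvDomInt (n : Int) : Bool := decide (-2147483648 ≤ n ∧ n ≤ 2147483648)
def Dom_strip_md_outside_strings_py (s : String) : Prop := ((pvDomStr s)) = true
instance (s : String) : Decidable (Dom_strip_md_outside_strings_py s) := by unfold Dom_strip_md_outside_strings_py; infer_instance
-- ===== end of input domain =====

-- B replaces A's per-character in_str/esc state machine with a span scanner:
-- quoted-string spans are copied verbatim, gaps are filtered of '*'/'`'. Same output, same cost.

-- ===== PORT A =====
-- A's loop state: (out, in_str, esc); one step per character, branches in A's order.
def pvStepA (st : List Char × Bool × Bool) (ch : Char) : List Char × Bool × Bool :=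
  match st with
  | (out, in_str, esc) =>
    if in_str then
      let out := out ++ [ch]
      let in_str' := if ch = '"' && !esc then false else in_str
      let esc' := ch = '\\' && !esc
      (out, in_str', esc')
    else
      if ch = '"' then (out ++ [ch], true, false)
      else if ch = '*' ∨ ch = '`' then (out, in_str, esc)
      else (out ++ [ch], in_str, esc)

def strip_md_outside_strings_py (s : String) : String :=
  String.mk (s.toList.foldl pvStepA ([], false, false)).1

-- ===== PORT B =====
-- B's inner scan (the `while k < n` loop): consume a quoted string after its opening
-- quote; a backslash consumes two characters at once (k += 2); returns
-- (span up to and including the closing quote, rest).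
def pvTakeStrB : List Char → List Char × List Char
  | [] => ([], [])
  | c :: rest =>
    if c = '\\' then
      match rest with
      | [] => ([c], [])           -- k runs past the end; min(k, n) keeps the backslash in the span
      | d :: rest' => let (b, r) := pvTakeStrB rest'; (c :: d :: b, r)
    else if c = '"' then ([c], rest)
    else let (b, r) := pvTakeStrB rest; (c :: b, r)

-- termination measure for pvGoB (cited by its decreasing_by)
theorem pvTakeStrB_snd_le (cs : List Char) : (pvTakeStrB cs).2.length ≤ cs.length := by
  match cs with
  | [] => rw [pvTakeStrB.eq_def]
  | c :: rest =>
    by_cases hb : c = '\\'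
    · subst hb
      match rest with
      | [] => rw [pvTakeStrB.eq_def]; simp
      | d :: rest' =>
        have ih := pvTakeStrB_snd_le rest'
        cases hbr : pvTakeStrB rest' with
        | mk b r =>
          rw [pvTakeStrB.eq_def]
          simp only [hbr] at ih ⊢
          simp at ih ⊢
          omega
    · by_cases hq : c = '"'
      · subst hq; rw [pvTakeStrB.eq_def]; simp
      · have ih := pvTakeStrB_snd_le rest
        cases hbr : pvTakeStrB rest with
        | mk b r =>
          rw [pvTakeStrB.eq_def]
          simp only [hbr] at ih ⊢
          simp [hb, hq] at ih ⊢
          omega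
termination_by cs.length

-- B's outer loop: s.find('"', pos) splits the remaining input at the next quote
-- (takeWhile/dropWhile); gap.replace('*','').replace('`','') is the filter.
def pvGoB (cs : List Char) : List Char :=
  let gap := (cs.takeWhile (fun c => !(c == '"'))).filter (fun c => !(c == '*' || c == '`'))
  match h : cs.dropWhile (fun c => !(c == '"')) with
  | [] => gap
  | q :: r => gap ++ q :: (pvTakeStrB r).1 ++ pvGoB (pvTakeStrB r).2
termination_by cs.length
decreasing_by
  have h1 : (pvTakeStrB r).2.length ≤ r.length := pvTakeStrB_snd_le r
  have h2 : (cs.dropWhile (fun c => !(c == '"'))).length ≤ cs.length :=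
    List.length_dropWhile_le _ _
  rw [h] at h2
  simp at h2 ⊢
  omega

def strip_md_outside_strings_py_alt (s : String) : String :=
  String.mk (pvGoB s.toList)

-- ===== PRECONDITION & SPEC =====
def Spec_strip_md_outside_strings_py (s : String) (out : String) : Prop := out = strip_md_outside_strings_py_alt s
instance (s : String) (out : String) : Decidable (Spec_strip_md_outside_strings_py s out) := by unfold Spec_strip_md_outside_strings_py; infer_instance

-- ===== CLAIM (what is proved, stated in full; the proofs are below) =====
def Claim_equal_strip_md_outside_strings_py : Prop := ∀ (s : String), Dom_strip_md_outside_strings_py s → Spec_strip_md_outside_strings_py s (strip_md_outside_strings_py s)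

-- ===== LEMMAS AND PROOFS =====

-- reduction lemmas for pvTakeStrB
theorem pvTakeStrB_quote (cs : List Char) : pvTakeStrB ('"' :: cs) = (['"'], cs) := by
  rw [pvTakeStrB.eq_def]; simp

theorem pvTakeStrB_bs1 : pvTakeStrB ['\\'] = (['\\'], []) := by
  rw [pvTakeStrB.eq_def]; simp

theorem pvTakeStrB_bs2 (d : Char) (cs : List Char) :
    pvTakeStrB ('\\' :: d :: cs) = ('\\' :: d :: (pvTakeStrB cs).1, (pvTakeStrB cs).2) := by
  cases hbr : pvTakeStrB cs with
  | mk b r => rw [pvTakeStrB.eq_def]; simp [hbr]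

theorem pvTakeStrB_other (c : Char) (cs : List Char) (h1 : ¬ c = '\\') (h2 : ¬ c = '"') :
    pvTakeStrB (c :: cs) = (c :: (pvTakeStrB cs).1, (pvTakeStrB cs).2) := by
  cases hbr : pvTakeStrB cs with
  | mk b r => rw [pvTakeStrB.eq_def]; simp [h1, h2, hbr]

-- one-step unfolding of pvGoB with a plain (non-dependent) match
theorem pvGoB_eq (cs : List Char) :
    pvGoB cs = (cs.takeWhile (fun c => !(c == '"'))).filter (fun c => !(c == '*' || c == '`')) ++
      (match cs.dropWhile (fun c => !(c == '"')) with
       | [] => []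
       | q :: r => q :: (pvTakeStrB r).1 ++ pvGoB (pvTakeStrB r).2) := by
  rw [pvGoB]
  split <;> rename_i h <;> simp [h]

theorem pvGoB_nil : pvGoB [] = [] := by
  simp [pvGoB_eq]

theorem pvGoB_quote (cs : List Char) :
    pvGoB ('"' :: cs) = '"' :: (pvTakeStrB cs).1 ++ pvGoB (pvTakeStrB cs).2 := by
  rw [pvGoB_eq]
  simp

theorem pvGoB_cons (c : Char) (cs : List Char) (h : ¬ c = '"') :
    pvGoB (c :: cs) = (if c = '*' ∨ c = '`' then [] else [c]) ++ pvGoB cs := by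
  rw [pvGoB_eq, pvGoB_eq (cs := cs)]
  have hc : (!(c == '"')) = true := by simp [h]
  rw [List.takeWhile_cons, List.dropWhile_cons]
  rw [hc]
  simp only [if_true]
  rw [List.filter_cons]
  by_cases hm : c = '*' ∨ c = '`'
  · have hf : (!(c == '*' || c == '`')) = false := by
      rcases hm with hm | hm <;> simp [hm]
    rw [hf, if_pos hm]
    simp
  · have hf : (!(c == '*' || c == '`')) = true := by
      rcases not_or.mp hm with ⟨h1, h2⟩
      simp [h1, h2]
    rw [hf, if_neg hm]
    simp

-- the characters A's loop emits from state (in_str, esc), without the accumulator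
def pvAout : List Char → Bool → Bool → List Char
  | [], _, _ => []
  | ch :: cs, in_str, esc =>
    if in_str then
      ch :: pvAout cs (if ch = '"' && !esc then false else in_str) (ch = '\\' && !esc)
    else if ch = '"' then ch :: pvAout cs true false
    else if ch = '*' ∨ ch = '`' then pvAout cs in_str esc
    else ch :: pvAout cs in_str esc

theorem pvFoldA : ∀ (cs : List Char) (out : List Char) (b e : Bool),
    (cs.foldl pvStepA (out, b, e)).1 = out ++ pvAout cs b e := by
  intro cs
  induction cs with
  | nil => intro out b e; simp [pvAout]
  | cons ch cs ih =>
      intro out b e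
      by_cases hb : b
      · subst hb
        simp only [List.foldl_cons, pvStepA, pvAout, ite_true]
        rw [ih]
        simp
      · simp only [Bool.not_eq_true] at hb; subst hb
        by_cases hq : ch = '"'
        · subst hq
          simp [pvStepA, pvAout, ih]
        · by_cases hm : ch = '*' ∨ ch = '`'
          · simp [pvStepA, pvAout, hq, hm, ih]
          · simp [pvStepA, pvAout, hq, hm, ih]

-- after an unescaped backslash the next character is consumed unconditionally
theorem pvAout_esc (c : Char) (cs : List Char) :
    pvAout (c :: cs) true true = c :: pvAout cs true false := by
  simp [pvAout]

-- main bridge: A's emitted stream equals B's span decomposition, from both start states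
theorem pvMain : ∀ (n : Nat) (cs : List Char), cs.length ≤ n →
    (pvAout cs false false = pvGoB cs) ∧
    (pvAout cs true false = (pvTakeStrB cs).1 ++ pvGoB (pvTakeStrB cs).2) := by
  intro n
  induction n with
  | zero =>
      intro cs h
      have : cs = [] := List.length_eq_zero_iff.mp (Nat.le_zero.mp h)
      subst this
      rw [pvTakeStrB.eq_def]
      simp [pvAout, pvGoB_nil]
  | succ n ih =>
      intro cs h
      cases cs with
      | nil =>
          rw [pvTakeStrB.eq_def]
          simp [pvAout, pvGoB_nil]
      | cons c cs' =>
        have hlen : cs'.length ≤ n := by simpa using h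
        constructor
        · -- outside-string start state
          by_cases hq : c = '"'
          · subst hq
            have := (ih cs' hlen).2
            simp [pvAout, pvGoB_quote, this]
          · by_cases hm : c = '*' ∨ c = '`'
            · have := (ih cs' hlen).1
              simp [pvAout, hq, hm, pvGoB_cons c cs' hq, this]
            · have := (ih cs' hlen).1
              simp [pvAout, hq, hm, pvGoB_cons c cs' hq, this]
        · -- inside-string start state, esc clear
          by_cases hbs : c = '\\'
          · subst hbs
            cases cs' with
            | nil => simp [pvAout, pvTakeStrB_bs1, pvGoB_nil]
            | cons d cs'' =>
              have hlen2 : cs''.length ≤ n := by simp at hlen; omega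
              have hI := (ih cs'' hlen2).2
              have e1 : pvAout ('\\' :: d :: cs'') true false
                  = '\\' :: pvAout (d :: cs'') true true := by
                simp [pvAout]
              rw [e1, pvAout_esc, hI, pvTakeStrB_bs2]
              simp
          · by_cases hq : c = '"'
            · subst hq
              have := (ih cs' hlen).1
              simp [pvAout, pvTakeStrB_quote, this]
            · have := (ih cs' hlen).2
              rw [pvTakeStrB_other c cs' hbs hq]
              simp [pvAout, hbs, hq, this]

-- ===== VERDICT (by name: the statement is the Claim_ definition above) =====
theorem strip_md_outside_strings_py_spec : Claim_equal_strip_md_outside_strings_py := by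
  intro s _
  unfold Spec_strip_md_outside_strings_py strip_md_outside_strings_py strip_md_outside_strings_py_alt
  rw [pvFoldA]
  rw [(pvMain s.toList.length s.toList le_rfl).1]
  rfl
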